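-- pv_equiv track=rewrite | github.com/infolabs/django-edw | backend/edw/utils/hash_helpers.py | cookie_hash
-- ===== SOURCE A (Python) =====
-- def int32(x):
--     x = 0xffffffff & x
--     if x > 0x7fffffff:
--         return -(~(x - 1) & 0xffffffff)
--     else:
--         return x
--
-- def cookie_hash(s):
--     hash_code = 0
--     if len(s) == 0:
--         return hash_code
--     for l in s:
--         char = ord(l)
--         hash_code = ((hash_code << 5) - hash_code) + char
--         hash_code = int32(hash_code)  # Convert to 32bit integer
--     return abs(hash_code)
-- ===== SOURCE B (Python) =====
-- def cookie_hash(s):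
--     # Evaluate the hash polynomial sum(ord(s[i]) * 31**(n-1-i)) right-to-left,
--     # maintaining an explicit running power of 31 (kept mod 2**32) alongside a
--     # full-precision sum; one signed-32-bit reduction at the end.
--     total = 0
--     power = 1
--     for c in reversed(s):
--         total += ord(c) * power
--         power = power * 31 % 4294967296
--     h = total % 4294967296
--     if h > 0x7fffffff:
--         h -= 4294967296
--     return abs(h)
-- ===== Notes on version B (the rewrite author's own statement) =====
-- stated objective: alternative
-- what changed: B evaluates the hash polynomial right-to-left over the reversed string, maintaining an explicit running power of 31 alongside a full-precision sum, with a single signed-32-bit reduction after the loop instead of A's per-character shift/mask int32 conversion.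
import Mathlib
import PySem

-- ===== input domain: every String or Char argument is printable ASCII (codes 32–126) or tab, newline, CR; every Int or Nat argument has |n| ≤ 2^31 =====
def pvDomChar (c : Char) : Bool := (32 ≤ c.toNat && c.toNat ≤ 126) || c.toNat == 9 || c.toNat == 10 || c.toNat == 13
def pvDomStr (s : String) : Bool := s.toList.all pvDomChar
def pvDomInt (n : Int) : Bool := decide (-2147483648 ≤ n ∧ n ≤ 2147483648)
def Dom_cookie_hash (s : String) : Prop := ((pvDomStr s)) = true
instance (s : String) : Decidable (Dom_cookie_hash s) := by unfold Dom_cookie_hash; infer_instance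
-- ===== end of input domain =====

-- B evaluates the hash polynomial right-to-left with an explicit running power of 31 and a
-- full-precision sum, reducing to a signed 32-bit value once at the end (objective: alternative).

-- ===== PORT A =====
def int32 (x : Int) : Int :=
  let x := PySem.Int.band 0xffffffff x           -- Python: 0xffffffff & x
  if x > 0x7fffffff then
    -(PySem.Int.band (Int.not (x - 1)) 0xffffffff)   -- Python: -(~(x - 1) & 0xffffffff)
  else x

def cookie_hash (s : String) : Int :=
  let hash_code : Int := 0
  if PySem.Str.len s == 0 then hash_code
  else
    let hash_code := s.toList.foldl (fun hash_code l =>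
      let char : Int := l.toNat                   -- ord(l)
      int32 ((hash_code <<< (5:Nat)) - hash_code + char)) hash_code
    |hash_code|

-- ===== PORT B =====
def cookie_hash_alt (s : String) : Int :=
  -- for c in reversed(s): total += ord(c)*power; power = power*31 % 2**32
  let tp := s.toList.reverse.foldl
    (fun (tp : Int × Int) c => (tp.1 + (c.toNat : Int) * tp.2, tp.2 * 31 % 4294967296))
    (0, 1)
  let h := tp.1 % 4294967296
  let h := if h > 0x7fffffff then h - 4294967296 else h
  |h|

-- ===== PRECONDITION & SPEC =====
def Spec_cookie_hash (s : String) (out : Int) : Prop := out = cookie_hash_alt s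
instance (s : String) (out : Int) : Decidable (Spec_cookie_hash s out) := by unfold Spec_cookie_hash; infer_instance

-- ===== CLAIM (what is proved, stated in full; the proofs are below) =====
def Claim_equal_cookie_hash : Prop := ∀ (s : String), Dom_cookie_hash s → Spec_cookie_hash s (cookie_hash s)

-- ===== LEMMAS AND PROOFS =====
theorem pv_not_eq (x : Int) : Int.not x = -x - 1 := by
  cases x <;> simp [Int.not, Int.negSucc_eq]; ring

theorem pv_band_mask (x : Int) : PySem.Int.band 0xffffffff x = x % 4294967296 := by
  unfold PySem.Int.band
  split_ifs with h1 h2 h2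
  · have hx : (0:Int) ≤ x := h2
    have : ((4294967295:Int).toNat &&& x.toNat) = x.toNat % (2^32) := by
      rw [show (4294967295:Int).toNat = 2^32 - 1 from rfl, Nat.land_comm]
      exact Nat.and_two_pow_sub_one_eq_mod x.toNat 32
    rw [this]
    have := Int.toNat_of_nonneg hx
    push_cast
    omega
  · have : ((4294967295:Int).toNat &&& (-x-1).toNat) = (-x-1).toNat % (2^32) := by
      rw [show (4294967295:Int).toNat = 2^32 - 1 from rfl, Nat.land_comm]
      exact Nat.and_two_pow_sub_one_eq_mod (-x-1).toNat 32
    rw [this]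
    have h3 := Int.toNat_of_nonneg (show (0:Int) ≤ -x-1 by omega)
    push_cast
    omega
  · omega
  · omega

theorem pv_band_mask' (x : Int) : PySem.Int.band x 0xffffffff = x % 4294967296 := by
  rw [PySem.Int.band_comm]; exact pv_band_mask x

-- int32 reduces to "x mod 2^32, shifted into the signed range"
theorem int32_eq (x : Int) :
    int32 x = if x % 4294967296 > 0x7fffffff then x % 4294967296 - 4294967296
              else x % 4294967296 := by
  simp only [int32, pv_band_mask]
  split_ifs with h
  · rw [pv_not_eq, show -(x % 4294967296 - 1) - 1 = -(x % 4294967296) from by ring,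
        pv_band_mask']
    omega
  · rfl

-- the reference polynomial: pvPoly (reversed list) with ascending powers of 31
def pvPoly : List Char → Int
  | [] => 0
  | c :: r => (c.toNat : Int) + 31 * pvPoly r

theorem pvPoly_append (r : List Char) (c : Char) :
    pvPoly (r ++ [c]) = pvPoly r + (c.toNat : Int) * 31 ^ r.length := by
  induction r with
  | nil => simp [pvPoly]
  | cons d r ih => simp [pvPoly, ih, pow_succ]; ring

-- full-precision Horner left fold equals the polynomial of the reversed list
theorem pv_horner_poly (l : List Char) : ∀ (x : Int),
    l.foldl (fun h c => h * 31 + (c.toNat : Int)) x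
      = x * 31 ^ l.length + pvPoly l.reverse := by
  induction l with
  | nil => intro x; simp [pvPoly]
  | cons c t ih =>
    intro x
    simp only [List.foldl_cons, List.reverse_cons, ih, pvPoly_append, List.length_cons,
      List.length_reverse, pow_succ]
    ring

-- loop invariant for A: its running int32 value is congruent mod 2^32 to the
-- full-precision Horner value, and stays in the signed 32-bit range
theorem pv_inv (l : List Char) : ∀ (a x : Int),
    a % 4294967296 = x % 4294967296 → -2147483648 ≤ a → a < 2147483648 →
    (l.foldl (fun hash_code c => int32 (hash_code <<< (5:Nat) - hash_code + (c.toNat : Int))) a) % 4294967296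
      = (l.foldl (fun h c => h * 31 + (c.toNat : Int)) x) % 4294967296
    ∧ -2147483648 ≤ l.foldl (fun hash_code c => int32 (hash_code <<< (5:Nat) - hash_code + (c.toNat : Int))) a
    ∧ l.foldl (fun hash_code c => int32 (hash_code <<< (5:Nat) - hash_code + (c.toNat : Int))) a < 2147483648 := by
  induction l with
  | nil => intro a x hmod hlo hhi; exact ⟨hmod, hlo, hhi⟩
  | cons c t ih =>
    intro a x hmod hlo hhi
    simp only [List.foldl_cons]
    apply ih
    · rw [int32_eq, Int.shiftLeft_eq]
      have hax : a * 31 % 4294967296 = x * 31 % 4294967296 :=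
        Int.ModEq.mul_right 31 hmod
      have h31 : (a * 2 ^ 5 - a + (c.toNat : Int)) % 4294967296
          = (x * 31 + (c.toNat : Int)) % 4294967296 := by
        have : a * 2 ^ 5 - a + (c.toNat : Int) = a * 31 + (c.toNat : Int) := by ring
        rw [this]
        exact Int.ModEq.add_right _ hax
      omega
    · rw [int32_eq]; omega
    · rw [int32_eq]; omega

-- loop invariant for B: the running sum is congruent mod 2^32 to total + pvPoly r * power
theorem pv_inv_b (r : List Char) : ∀ (t p q : Int), p % 4294967296 = q % 4294967296 →
    (r.foldl (fun (tp : Int × Int) c =>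
        (tp.1 + (c.toNat : Int) * tp.2, tp.2 * 31 % 4294967296)) (t, p)).1 % 4294967296
      = (t + pvPoly r * q) % 4294967296 := by
  induction r with
  | nil => intro t p q _; simp [pvPoly]
  | cons c r ih =>
    intro t p q hpq
    simp only [List.foldl_cons]
    have hstep : (p * 31 % 4294967296) % 4294967296 = (31 * q) % 4294967296 := by
      have h1 : p * 31 % 4294967296 = q * 31 % 4294967296 := Int.ModEq.mul_right 31 hpq
      have : q * 31 = 31 * q := by ring
      omega
    rw [ih (t + (c.toNat : Int) * p) _ (31 * q) hstep]
    have hc : ((c.toNat : Int) * p) % 4294967296 = ((c.toNat : Int) * q) % 4294967296 :=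
      Int.ModEq.mul_left _ hpq
    have hgoal : t + (c.toNat : Int) * q + pvPoly r * (31 * q)
        = t + pvPoly (c :: r) * q := by
      simp only [pvPoly]; ring
    have h1 : (t + (c.toNat : Int) * p + pvPoly r * (31 * q)) % 4294967296
        = (t + (c.toNat : Int) * q + pvPoly r * (31 * q)) % 4294967296 :=
      Int.ModEq.add_right _ (Int.ModEq.add_left _ hc)
    rw [h1, hgoal]

-- ===== VERDICT (by name: the statement is the Claim_ definition above) =====
theorem cookie_hash_spec : Claim_equal_cookie_hash := by
  intro s _
  unfold Spec_cookie_hash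
  simp only [cookie_hash, cookie_hash_alt]
  obtain ⟨hmod, hlo, hhi⟩ := pv_inv s.toList 0 0 rfl (by omega) (by omega)
  set a := s.toList.foldl (fun hash_code c => int32 (hash_code <<< (5:Nat) - hash_code + (c.toNat : Int))) 0 with ha
  set t := (s.toList.reverse.foldl (fun (tp : Int × Int) c =>
      (tp.1 + (c.toNat : Int) * tp.2, tp.2 * 31 % 4294967296)) (0, 1)).1 with ht
  have hb := pv_inv_b s.toList.reverse 0 1 1 rfl
  rw [← ht] at hb
  have hh : (s.toList.foldl (fun h c => h * 31 + (c.toNat : Int)) 0)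
      = pvPoly s.toList.reverse := by
    rw [pv_horner_poly]; ring
  rw [hh] at hmod
  have hkey : a % 4294967296 = t % 4294967296 := by
    have : (0 + pvPoly s.toList.reverse * 1) = pvPoly s.toList.reverse := by ring
    rw [this] at hb
    omega
  have hmr : 0 ≤ t % 4294967296 ∧ t % 4294967296 < 4294967296 :=
    ⟨Int.emod_nonneg _ (by omega), Int.emod_lt_of_pos _ (by omega)⟩
  have hlen : PySem.Str.len s = (s.toList.length : Int) := by simp
  have hcond : (PySem.Str.len s == 0) = true ↔ s.toList = [] := by
    rw [beq_iff_eq, hlen]; simp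
  by_cases h0 : s.toList = []
  · rw [if_pos (hcond.mpr h0)]
    have ht0 : t = 0 := by rw [ht, h0]; rfl
    rw [ht0]
    norm_num
  · rw [if_neg (fun hc => h0 (hcond.mp hc))]
    have : a = if t % 4294967296 > 2147483647 then t % 4294967296 - 4294967296
               else t % 4294967296 := by
      split_ifs <;> omega
    rw [this]
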